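-- pv_equiv track=rewrite | github.com/arkinmukherjee/signaligner | scripts/import_dataset.py | rangesample
-- ===== SOURCE A (Python) =====
-- def rangesample(sample, slen):
--     ret = [None] * slen
--
--     for s in sample:
--         for ii in range(slen):
--             if s[ii] != None:
--                 if ret[ii] == None:
--                     ret[ii] = (s[ii], s[ii])
--                 else:
--                     ret[ii] = (min(s[ii], ret[ii][0]),  max(s[ii], ret[ii][1]))
--
--     return ret
-- ===== SOURCE B (Python) =====
-- def rangesample(sample, slen):
--     ret = []
--     for ii in range(slen):
--         vals = [s[ii] for s in sample if s[ii] != None]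
--         ret.append((min(vals), max(vals)) if vals else None)
--     return ret
-- ===== Notes on version B (the rewrite author's own statement) =====
-- stated objective: simpler
-- what changed: Column-major rewrite: instead of maintaining a running (min,max) state per column while scanning rows, B builds each column's non-None values with a comprehension and reduces it with min/max once; the mutable ret array and its cell-update cases disappear.
import Mathlib
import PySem

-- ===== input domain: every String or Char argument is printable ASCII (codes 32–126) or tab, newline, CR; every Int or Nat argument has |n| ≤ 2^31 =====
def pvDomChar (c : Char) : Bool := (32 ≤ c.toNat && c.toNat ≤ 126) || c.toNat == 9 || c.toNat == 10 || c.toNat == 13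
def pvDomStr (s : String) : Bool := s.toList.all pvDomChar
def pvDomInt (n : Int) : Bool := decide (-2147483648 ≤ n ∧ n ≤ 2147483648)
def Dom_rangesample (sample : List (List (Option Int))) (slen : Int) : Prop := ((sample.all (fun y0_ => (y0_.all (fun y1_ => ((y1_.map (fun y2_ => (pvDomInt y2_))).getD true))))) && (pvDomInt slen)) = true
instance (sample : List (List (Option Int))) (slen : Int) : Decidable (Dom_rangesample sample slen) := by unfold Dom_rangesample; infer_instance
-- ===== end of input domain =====

-- B is a column-major rewrite of A (per-column comprehension + min/max instead of a
-- mutable running (min,max) state updated row by row); objective: simpler.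

-- ===== PORT A =====
-- body of the inner loop: one cell update of the mutable ret; s[ii] via pyGet? (none = IndexError, excluded by Pre_)
def rangesampleUpd (s : List (Option Int)) (r : List (Option (Int × Int))) (ii : Int) :
    List (Option (Int × Int)) :=
  match PySem.List.pyGet? s ii with
  | some (some v) =>
      match PySem.List.pyGet? r ii with
      | some none => r.set ii.toNat (some (v, v))
      | some (some p) => r.set ii.toNat (some (min v p.1, max v p.2))
      | none => r      -- unreachable: 0 ≤ ii < slen = len r
  | _ => r             -- s[ii] == None, or IndexError (outside Pre_)

-- inner loop 'for ii in range(slen)'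
def rangesampleRow (slen : Int) (ret : List (Option (Int × Int))) (s : List (Option Int)) :
    List (Option (Int × Int)) :=
  (PySem.List.pyRange 0 slen 1).foldl (rangesampleUpd s) ret

def rangesample (sample : List (List (Option Int))) (slen : Int) : List (Option (Int × Int)) :=
  sample.foldl (rangesampleRow slen) (List.replicate slen.toNat none)

-- ===== PORT B =====
-- min?/max? return none exactly on the empty list = Python's 'if vals else None' guard
def rangesample_alt (sample : List (List (Option Int))) (slen : Int) : List (Option (Int × Int)) :=
  (PySem.List.pyRange 0 slen 1).map (fun ii =>
    let vals : List Int := sample.filterMap (fun s =>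
      match PySem.List.pyGet? s ii with
      | some (some v) => some v
      | _ => none)
    match PySem.List.min? vals (fun y => y), PySem.List.max? vals (fun y => y) with
    | some lo, some hi => some (lo, hi)
    | _, _ => none)

-- ===== PRECONDITION & SPEC =====
-- Pre_ excludes exactly the inputs where Python A raises IndexError: some row shorter than slen
-- (for slen ≤ 0 the condition is vacuously true and both programs return []).
def Pre_rangesample (sample : List (List (Option Int))) (slen : Int) : Prop :=
  ∀ s ∈ sample, slen ≤ (s.length : Int)
instance (sample : List (List (Option Int))) (slen : Int) : Decidable (Pre_rangesample sample slen) := by unfold Pre_rangesample; infer_instance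

def pvWitness_rangesample : List (List (Option Int)) × Int :=
  ([[some 1, none], [some 2, some 3]], 2)

def Spec_rangesample (sample : List (List (Option Int))) (slen : Int) (out : List (Option (Int × Int))) : Prop := out = rangesample_alt sample slen
instance (sample : List (List (Option Int))) (slen : Int) (out : List (Option (Int × Int))) : Decidable (Spec_rangesample sample slen out) := by unfold Spec_rangesample; infer_instance

-- ===== CLAIM (what is proved, stated in full; the proofs are below) =====
def Claim_equal_rangesample : Prop := ∀ (sample : List (List (Option Int))) (slen : Int), Dom_rangesample sample slen → Pre_rangesample sample slen → Spec_rangesample sample slen (rangesample sample slen)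

-- ===== LEMMAS AND PROOFS =====

-- the per-cell read and the per-cell transition both programs implement
def colGet (s : List (Option Int)) (ii : Int) : Option Int :=
  match PySem.List.pyGet? s ii with
  | some (some v) => some v
  | _ => none

def colStep (acc : Option (Int × Int)) (ov : Option Int) : Option (Int × Int) :=
  match ov with
  | none => acc
  | some v =>
    match acc with
    | none => some (v, v)
    | some p => some (min v p.1, max v p.2)

theorem upd_length (s : List (Option Int)) (r : List (Option (Int × Int))) (ii : Int) :
    (rangesampleUpd s r ii).length = r.length := by
  unfold rangesampleUpd
  repeat' split
  all_goals simp

theorem upd_get (s : List (Option Int)) (r : List (Option (Int × Int))) (ii : Int)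
    (k : Nat) (h0 : 0 ≤ ii) (hii : ii.toNat < r.length) :
    (rangesampleUpd s r ii)[k]? =
      if (k : Int) = ii then (r[k]?).map (fun acc => colStep acc (colGet s ii))
      else r[k]? := by
  have hget : PySem.List.pyGet? r ii = some r[ii.toNat] :=
    PySem.List.pyGet?_eq_some_getElem r h0 (by exact_mod_cast (by omega : ii < (r.length : Int)))
  by_cases hk : (k : Int) = ii
  · have hkt : k = ii.toNat := by omega
    subst hkt
    rw [if_pos hk]
    have hr : r[ii.toNat]? = some r[ii.toNat] := List.getElem?_eq_getElem hii
    unfold rangesampleUpd colGet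
    cases hs : PySem.List.pyGet? s ii with
    | none => simp [hr, colStep]
    | some o =>
      cases o with
      | none => simp [hr, colStep]
      | some v =>
        rw [hget]
        cases hrv : r[ii.toNat] with
        | none => simp [hii, hrv, colStep]
        | some p => simp [hii, hrv, colStep]
  · rw [if_neg hk]
    have hne : ¬ (ii.toNat = k) := by omega
    unfold rangesampleUpd
    cases hs : PySem.List.pyGet? s ii with
    | none => rfl
    | some o =>
      cases o with
      | none => rfl
      | some v =>
        rw [hget]
        cases hrv : r[ii.toNat] with
        | none => simp [hne]
        | some p => simp [hne]

theorem row_get (s : List (Option Int)) (slen : Int) :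
    ∀ (n : Nat) (a : Int) (ret : List (Option (Int × Int))) (k : Nat),
      ret.length = slen.toNat → 0 ≤ a → (slen - a).toNat = n →
    ((PySem.List.pyRange a slen 1).foldl (rangesampleUpd s) ret)[k]? =
      if a ≤ (k : Int) ∧ (k : Int) < slen then
        (ret[k]?).map (fun acc => colStep acc (colGet s k))
      else ret[k]? := by
  intro n
  induction n with
  | zero =>
    intro a ret k hlen ha hn
    have hba : slen ≤ a := by omega
    rw [PySem.List.pyRange_one_eq_nil hba, List.foldl_nil, if_neg (by omega)]
  | succ m ih =>
    intro a ret k hlen ha hn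
    have hab : a < slen := by omega
    rw [PySem.List.pyRange_one_cons hab, List.foldl_cons]
    rw [ih (a + 1) (rangesampleUpd s ret a) k (by rw [upd_length]; exact hlen) (by omega) (by omega)]
    have hupd := upd_get s ret a k ha (by omega)
    by_cases hk : (k : Int) = a
    · rw [if_neg (by omega), if_pos (by constructor <;> omega), hupd, if_pos hk, hk]
    · rw [hupd, if_neg hk]
      by_cases hka : a + 1 ≤ (k : Int) ∧ (k : Int) < slen
      · rw [if_pos hka, if_pos (by constructor <;> omega)]
      · rw [if_neg hka, if_neg (by omega)]

theorem fold_rows_get (slen : Int) (rows : List (List (Option Int))) :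
    ∀ (ret : List (Option (Int × Int))) (k : Nat), ret.length = slen.toNat →
    (rows.foldl (rangesampleRow slen) ret)[k]? =
      (ret[k]?).map (fun acc => rows.foldl (fun a s => colStep a (colGet s k)) acc) := by
  induction rows with
  | nil =>
    intro ret k hlen
    simp
  | cons s rows ih =>
    intro ret k hlen
    rw [List.foldl_cons]
    have hlen' : (rangesampleRow slen ret s).length = slen.toNat := by
      unfold rangesampleRow
      have : ∀ (l : List Int) (r : List (Option (Int × Int))),
          (l.foldl (rangesampleUpd s) r).length = r.length := by
        intro l
        induction l with
        | nil => intro r; rfl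
        | cons i t iht => intro r; rw [List.foldl_cons, iht, upd_length]
      rw [this, hlen]
    rw [ih _ k hlen']
    unfold rangesampleRow
    rw [row_get s slen (slen - 0).toNat 0 ret k hlen le_rfl rfl]
    by_cases hks : (k : Int) < slen
    · rw [if_pos ⟨by omega, hks⟩]
      cases hr : ret[k]? <;> simp
    · rw [if_neg (by omega)]
      have : ret[k]? = none := by
        apply List.getElem?_eq_none
        omega
      simp [this]

theorem colfold_aux (ii : Int) (rows : List (List (Option Int))) :
    ∀ lo hi : Int,
      rows.foldl (fun a s => colStep a (colGet s ii)) (some (lo, hi)) =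
        some (((rows.filterMap (fun s => colGet s ii)).foldl min lo),
              ((rows.filterMap (fun s => colGet s ii)).foldl max hi)) := by
  induction rows with
  | nil => intro lo hi; rfl
  | cons s rows ih =>
    intro lo hi
    cases hs : colGet s ii with
    | none =>
      simp only [List.foldl_cons, List.filterMap_cons, hs]
      exact ih lo hi
    | some v =>
      simp only [List.foldl_cons, List.filterMap_cons, hs]
      rw [show colStep (some (lo, hi)) (some v) = some (min lo v, max hi v) by
        simp [colStep, min_comm, max_comm]]
      exact ih (min lo v) (max hi v)

theorem colfold (ii : Int) (rows : List (List (Option Int))) :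
    rows.foldl (fun a s => colStep a (colGet s ii)) none =
      match rows.filterMap (fun s => colGet s ii) with
      | [] => none
      | v :: t => some (t.foldl min v, t.foldl max v) := by
  induction rows with
  | nil => rfl
  | cons s rows ih =>
    cases hs : colGet s ii with
    | none =>
      simp only [List.foldl_cons, List.filterMap_cons, hs]
      exact ih
    | some v =>
      simp only [List.foldl_cons, List.filterMap_cons, hs]
      exact colfold_aux ii rows v v

theorem alt_elem (sample : List (List (Option Int))) (ii : Int) :
    (match PySem.List.min? (sample.filterMap (fun s => colGet s ii)) (fun y => y),
           PySem.List.max? (sample.filterMap (fun s => colGet s ii)) (fun y => y) with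
     | some lo, some hi => some (lo, hi)
     | _, _ => (none : Option (Int × Int))) =
    sample.foldl (fun a s => colStep a (colGet s ii)) none := by
  rw [colfold]
  cases hv : sample.filterMap (fun s => colGet s ii) with
  | nil => rfl
  | cons v t => rw [PySem.List.min?_id_cons, PySem.List.max?_id_cons]

-- ===== VERDICT (by name: the statement is the Claim_ definition above) =====
theorem rangesample_spec : Claim_equal_rangesample := by
  intro sample slen _ _
  unfold Spec_rangesample
  apply List.ext_getElem?
  intro k
  unfold rangesample
  rw [fold_rows_get slen sample _ k (by simp)]
  unfold rangesample_alt
  rw [List.getElem?_map]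
  by_cases hk : k < slen.toNat
  · have hrep : (List.replicate slen.toNat (none : Option (Int × Int)))[k]? = some none := by
      simp [List.getElem?_replicate, hk]
    have hrange : (PySem.List.pyRange 0 slen 1)[k]? = some (k : Int) := by
      rw [PySem.List.pyRange_one]
      simp [List.getElem?_range, List.getElem?_map, hk]
    rw [hrep, hrange, Option.map_some, Option.map_some]
    exact congrArg some (alt_elem sample (k : Int)).symm
  · have hrep : (List.replicate slen.toNat (none : Option (Int × Int)))[k]? = none := by
      simp [List.getElem?_replicate, hk]
    have hrange : (PySem.List.pyRange 0 slen 1)[k]? = none := by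
      apply List.getElem?_eq_none
      rw [PySem.List.length_pyRange_one]
      omega
    rw [hrep, hrange]
    rfl
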